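-- pv_equiv track=rewrite | github.com/pypi-data/pypi-mirror-397 | packages/pvn-fmc-mcp/pvn_fmc_mcp-0.3.1.tar.gz/pvn_fmc_mcp-0.3.1/pvn_fmc_mcp/server.py | _map_prefix_to_fmc
-- ===== SOURCE A (Python) =====
-- from typing import Optional
--
-- def _map_prefix_to_fmc(object_name: str) -> Optional[str]:
--     """Map object name prefixes to FMC names for convenience."""
--     prefix_mappings = {
--         "ATH-": "Athens-FMC",
--         "HQ-": "US-FMC",
--         "IRE-": "IRE-FMC",
--         "GER-": "GER-FMC",
--         # Add more prefixes as needed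
--     }
--
--     object_upper = object_name.upper()
--     for prefix, fmc_name in prefix_mappings.items():
--         if object_upper.startswith(prefix):
--             return fmc_name
--
--     return None
-- ===== SOURCE B (Python) =====
-- from typing import Optional
--
-- def _map_prefix_to_fmc(object_name: str) -> Optional[str]:
--     """Map object name prefixes to FMC names for convenience."""
--     prefix_mappings = {
--         "ATH-": "Athens-FMC",
--         "HQ-": "US-FMC",
--         "IRE-": "IRE-FMC",
--         "GER-": "GER-FMC",
--     }
--     object_upper = object_name.upper()
--     i = object_upper.find('-')
--     if i == -1:
--         return None
--     return prefix_mappings.get(object_upper[:i + 1])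
-- ===== Notes on version B (the rewrite author's own statement) =====
-- stated objective: alternative
-- what changed: B computes the lookup key directly (the uppercased name up to and including its first dash, found via str.find) and does a single dict .get, instead of A's loop testing startswith against every prefix in the mapping.
import Mathlib
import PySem

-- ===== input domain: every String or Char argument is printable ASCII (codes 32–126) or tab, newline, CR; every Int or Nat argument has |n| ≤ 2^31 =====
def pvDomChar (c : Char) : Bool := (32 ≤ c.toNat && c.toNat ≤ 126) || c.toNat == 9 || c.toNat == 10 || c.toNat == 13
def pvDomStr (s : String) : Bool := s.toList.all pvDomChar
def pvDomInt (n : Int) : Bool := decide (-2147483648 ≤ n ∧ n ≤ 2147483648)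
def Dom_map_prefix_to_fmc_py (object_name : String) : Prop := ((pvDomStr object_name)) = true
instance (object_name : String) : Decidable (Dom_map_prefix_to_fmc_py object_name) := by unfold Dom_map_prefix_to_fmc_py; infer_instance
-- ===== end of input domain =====

-- B replaces A's scan over every prefix by computing the lookup key (everything up to and
-- including the first dash of the uppercased name) and doing a single dict lookup ('alternative').

-- ===== PORT A =====
-- the dict literal of A, as an association list in insertion order
def pvMappings : List (String × String) :=
  [("ATH-", "Athens-FMC"), ("HQ-", "US-FMC"), ("IRE-", "IRE-FMC"), ("GER-", "GER-FMC")]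

-- the 'for prefix, fmc_name in prefix_mappings.items(): if …: return …' loop
def pvLoopA (u : String) : List (String × String) → Option String
  | [] => none
  | (p, f) :: rest => if PySem.Str.startswith u p then some f else pvLoopA u rest

def map_prefix_to_fmc_py (object_name : String) : Option String :=
  pvLoopA (PySem.Str.upper object_name) pvMappings

-- ===== PORT B =====
def pvMappingsDict : PySem.Dict String String :=
  PySem.Dict.ofList
    [("ATH-", "Athens-FMC"), ("HQ-", "US-FMC"), ("IRE-", "IRE-FMC"), ("GER-", "GER-FMC")]

def map_prefix_to_fmc_py_alt (object_name : String) : Option String :=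
  let object_upper := PySem.Str.upper object_name
  let i := PySem.Str.find object_upper "-"
  if i = -1 then none
  else pvMappingsDict.get? (PySem.Str.slice object_upper none (some (i + 1)))

-- ===== PRECONDITION & SPEC =====
def Spec_map_prefix_to_fmc_py (object_name : String) (out : Option String) : Prop := out = map_prefix_to_fmc_py_alt object_name
instance (object_name : String) (out : Option String) : Decidable (Spec_map_prefix_to_fmc_py object_name out) := by unfold Spec_map_prefix_to_fmc_py; infer_instance

-- ===== CLAIM (what is proved, stated in full; the proofs are below) =====
def Claim_equal_map_prefix_to_fmc_py : Prop := ∀ (object_name : String), Dom_map_prefix_to_fmc_py object_name → Spec_map_prefix_to_fmc_py object_name (map_prefix_to_fmc_py object_name)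

-- ===== LEMMAS AND PROOFS =====

-- ['-'] is a prefix of t exactly when t's first element is '-'
lemma singleton_dash_prefix_iff (t : List Char) : ['-'] <+: t ↔ t[0]? = some '-' := by
  cases t with
  | nil => simp
  | cons a t => simp [List.cons_prefix_cons, eq_comm]

-- For a pattern P whose ONLY dash is its last character, "l starts with P" is the same as
-- "l up to and including its first dash equals P", where n is the index of l's first dash.
lemma prefix_iff_take_first_dash (l P : List Char) (n : Nat)
    (hn : l[n]? = some '-') (hj : ∀ j < n, l[j]? ≠ some '-')
    (hP : 0 < P.length) (hPd : P[P.length - 1]? = some '-')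
    (hPj : ∀ j, j < P.length - 1 → P[j]? ≠ some '-') :
    (P <+: l ↔ l.take (n + 1) = P) := by
  constructor
  · intro h
    obtain ⟨t, ht⟩ := h
    have hget : ∀ j, j < P.length → l[j]? = P[j]? := by
      intro j hjP
      rw [← ht, List.getElem?_append_left hjP]
    have h1 : n ≤ P.length - 1 := by
      by_contra hc
      exact hj (P.length - 1) (by omega) (by rw [hget _ (by omega)]; exact hPd)
    have h2 : ¬ n < P.length - 1 := by
      intro hc
      exact hPj n hc (by rw [← hget _ (by omega)]; exact hn)
    have hnP : n + 1 = P.length := by omega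
    rw [← ht, hnP, List.take_left]
  · intro h
    rw [← h]
    exact List.take_prefix _ _

lemma startswith_eq_decide_take (l P : List Char) (n : Nat)
    (hn : l[n]? = some '-') (hj : ∀ j < n, l[j]? ≠ some '-')
    (hP : 0 < P.length) (hPd : P[P.length - 1]? = some '-')
    (hPj : ∀ j, j < P.length - 1 → P[j]? ≠ some '-') :
    PySem.Chars.startswith l P = decide (l.take (n + 1) = P) := by
  have hiff := prefix_iff_take_first_dash l P n hn hj hP hPd hPj
  cases hb : PySem.Chars.startswith l P with
  | true =>
    have := hiff.mp ((PySem.Chars.startswith_iff l P).mp hb)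
    simp [this]
  | false =>
    have : ¬ l.take (n + 1) = P := fun hc =>
      (Bool.eq_false_iff.mp hb) ((PySem.Chars.startswith_iff l P).mpr (hiff.mpr hc))
    simp [this]

-- ===== VERDICT (by name: the statement is the Claim_ definition above) =====
theorem map_prefix_to_fmc_py_spec : Claim_equal_map_prefix_to_fmc_py := by
  intro s _
  unfold Spec_map_prefix_to_fmc_py map_prefix_to_fmc_py map_prefix_to_fmc_py_alt
  set u := PySem.Str.upper s with hu
  have hfind : PySem.Str.find u "-" = PySem.Chars.find u.toList ['-'] := by
    simp [PySem.Str.find_eq]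
  by_cases h1 : PySem.Str.find u "-" = -1
  · -- no dash: A's startswith tests all fail, B returns none
    have hninf : ¬ (['-'] <:+: u.toList) := by
      rw [← PySem.Chars.find_eq_neg_one_iff, ← hfind]; exact h1
    have hnd : ('-' : Char) ∉ u.toList := fun hm => by
      obtain ⟨t1, t2, ht⟩ := List.append_of_mem hm
      exact hninf ⟨t1, t2, by simp [ht]⟩
    have hsw : ∀ P : List Char, '-' ∈ P → PySem.Chars.startswith u.toList P = false := by
      intro P hPd
      cases hb : PySem.Chars.startswith u.toList P with
      | false => rfl
      | true => exact absurd (((PySem.Chars.startswith_iff u.toList P).mp hb).subset hPd) hnd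
    simp only [h1, pvMappings, pvLoopA, PySem.Str.startswith_eq]
    rw [hsw _ (by decide), hsw _ (by decide), hsw _ (by decide), hsw _ (by decide)]
    simp
  · -- a dash exists; n is the index of the first dash
    have h0 : 0 ≤ PySem.Str.find u "-" := by
      have := PySem.Chars.neg_one_le_find u.toList ['-']
      omega
    set n := (PySem.Str.find u "-").toNat with hnn
    have hin : PySem.Str.find u "-" = (n : Int) := by omega
    have hspec := PySem.Chars.find_spec (s := u.toList) (sub := ['-'])
      (hfind ▸ h0)
    rw [← hfind] at hspec
    have hn : u.toList[n]? = some '-' := by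
      have := (singleton_dash_prefix_iff _).mp hspec.1
      rw [List.getElem?_drop] at this
      simpa using this
    have hj : ∀ j < n, u.toList[j]? ≠ some '-' := by
      intro j hjn hc
      exact hspec.2 j hjn ((singleton_dash_prefix_iff _).mpr
        (by rw [List.getElem?_drop]; simpa using hc))
    -- the computed key is u.toList.take (n+1)
    have hkey : (PySem.Str.slice u none (some (PySem.Str.find u "-" + 1))).toList
        = u.toList.take (n + 1) := by
      rw [PySem.Str.toList_slice, PySem.Chars.slice_eq_listSlice, hin,
        show ((n : Int) + 1) = ((n + 1 : Nat) : Int) by push_cast; ring,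
        PySem.List.slice_to_natCast]
    simp only [if_neg h1, pvMappings, pvLoopA, pvMappingsDict, PySem.Str.startswith_eq]
    rw [startswith_eq_decide_take u.toList "ATH-".toList n hn hj (by decide) (by decide) (by decide),
        startswith_eq_decide_take u.toList "HQ-".toList n hn hj (by decide) (by decide) (by decide),
        startswith_eq_decide_take u.toList "IRE-".toList n hn hj (by decide) (by decide) (by decide),
        startswith_eq_decide_take u.toList "GER-".toList n hn hj (by decide) (by decide) (by decide)]
    set key := PySem.Str.slice u none (some (PySem.Str.find u "-" + 1)) with hk
    have hkeq : ∀ P : String, (P == key) = decide (u.toList.take (n + 1) = P.toList) := by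
      intro P
      have hiff : (P = key) ↔ (u.toList.take (n + 1) = P.toList) := by
        rw [← hkey]
        constructor
        · intro h; rw [h]
        · intro h
          apply String.ext
          show P.toList = key.toList
          rw [← h]
      cases hb : (P == key) with
      | true =>
        rw [beq_iff_eq] at hb
        simp [hiff.mp hb]
      | false =>
        rw [beq_eq_false_iff_ne] at hb
        have hne : ¬ u.toList.take (n + 1) = P.toList := fun hc => hb (hiff.mpr hc)
        simp [hne]
    rw [show PySem.Dict.ofList
        [(("ATH-" : String), ("Athens-FMC" : String)), ("HQ-", "US-FMC"), ("IRE-", "IRE-FMC"), ("GER-", "GER-FMC")]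
        = PySem.Dict.mk [(("ATH-" : String), ("Athens-FMC" : String)), ("HQ-", "US-FMC"), ("IRE-", "IRE-FMC"), ("GER-", "GER-FMC")] from by decide]
    rw [PySem.Dict.get?_mk_cons, PySem.Dict.get?_mk_cons, PySem.Dict.get?_mk_cons, PySem.Dict.get?_mk_cons]
    rw [hkeq, hkeq, hkeq, hkeq]
    by_cases c1 : u.toList.take (n + 1) = "ATH-".toList <;>
      by_cases c2 : u.toList.take (n + 1) = "HQ-".toList <;>
        by_cases c3 : u.toList.take (n + 1) = "IRE-".toList <;>
          by_cases c4 : u.toList.take (n + 1) = "GER-".toList <;>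
            simp_all [PySem.Dict.get?]
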